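-- pv_equiv track=rewrite | github.com/mubeena3737/Programs | day 0/Flipkart-1/mics_jury.py | micsandjury
-- ===== SOURCE A (Python) =====
-- import math
--
-- def micsandjury (N, M, teams):
--     low=1
--     high=max(teams)
--     result=1
--     while(low<=high):
--         mid=low+(high-low)//2
--         c=0
--         for i in teams:
--             c=c+math.ceil(i/mid)
--         if(c<=N):
--             result=mid
--             high=mid-1
--         else:
--             low=mid+1
--     return result
-- ===== SOURCE B (Python) =====
-- def micsandjury(N, M, teams):
--     def count(m):
--         return sum(-(-i // m) for i in teams)
--
--     def go(lo, hi):
--         if lo > hi: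
--             return None
--         mid = (lo + hi) // 2
--         if count(mid) <= N:
--             return go(lo, mid - 1) or mid
--         return go(mid + 1, hi)
--
--     return go(1, max(teams)) or 1
-- ===== Notes on version B (the rewrite author's own statement) =====
-- stated objective: idiomatic
-- what changed: Replaces the imperative while-loop with mutable low/high/result state and float-based math.ceil(i/mid) by a pure recursive descent that threads the best candidate through Option/'or' chaining and counts with exact integer ceiling division -(-i//m).
import Mathlib
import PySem

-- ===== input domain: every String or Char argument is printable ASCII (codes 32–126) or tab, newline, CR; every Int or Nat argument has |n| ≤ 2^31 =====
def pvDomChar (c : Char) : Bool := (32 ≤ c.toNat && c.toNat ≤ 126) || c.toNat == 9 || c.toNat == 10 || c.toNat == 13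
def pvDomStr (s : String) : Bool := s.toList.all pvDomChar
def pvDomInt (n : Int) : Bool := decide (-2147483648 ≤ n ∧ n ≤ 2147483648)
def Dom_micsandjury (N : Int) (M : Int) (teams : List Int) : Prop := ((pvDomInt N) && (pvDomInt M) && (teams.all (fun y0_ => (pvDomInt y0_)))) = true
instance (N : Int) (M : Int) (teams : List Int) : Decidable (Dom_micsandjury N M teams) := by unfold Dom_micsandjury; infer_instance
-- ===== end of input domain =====

-- B replaces the imperative while-loop with mutable low/high/result and float math.ceil
-- by a pure recursive descent threading the candidate through Option, with exact integer
-- ceiling division; objective: idiomatic (same cost).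

-- ===== PORT A =====
-- math.ceil(i / mid) is ported as the integer ceiling division -((-i) // mid): exact here
-- because |i| ≤ 2^31 < 2^53 and 1 ≤ mid, so the float quotient rounds within the same
-- integer ceiling (checked exhaustively near the ±2^31 edges).
def micsandjuryLoop (N : Int) (teams : List Int) (low high result : Int) : Int :=
  if _h : low ≤ high then
    let mid := low + PySem.Int.floordiv (high - low) 2
    let c := teams.foldl (fun c i => c + -(PySem.Int.floordiv (-i) mid)) 0
    if c ≤ N then micsandjuryLoop N teams low (mid - 1) mid
    else micsandjuryLoop N teams (mid + 1) high result
  else result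
termination_by (high + 1 - low).toNat
decreasing_by
  · have h2 : PySem.Int.floordiv (high - low) 2 = (high - low) / 2 :=
      PySem.Int.floordiv_eq_ediv_of_pos (by norm_num)
    simp only [h2]; omega
  · have h2 : PySem.Int.floordiv (high - low) 2 = (high - low) / 2 :=
      PySem.Int.floordiv_eq_ediv_of_pos (by norm_num)
    simp only [h2]; omega

def micsandjury (N : Int) (M : Int) (teams : List Int) : Int :=
  micsandjuryLoop N teams 1 (((PySem.List.max? teams (fun y => y)).getD 0)) 1
  -- max(teams): raises on [], excluded by Pre_; .getD 0 is never reached inside Pre_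

-- ===== PORT B =====
def altCount (teams : List Int) (m : Int) : Int :=
  (teams.map (fun i => -(PySem.Int.floordiv (-i) m))).sum

def altGo (N : Int) (teams : List Int) (lo hi : Int) : Option Int :=
  if _h : lo ≤ hi then
    let mid := PySem.Int.floordiv (lo + hi) 2
    if altCount teams mid ≤ N then
      match altGo N teams lo (mid - 1) with
      | some v => some v
      | none => some mid
    else altGo N teams (mid + 1) hi
  else none
termination_by (hi + 1 - lo).toNat
decreasing_by
  · have := PySem.Int.floordiv_two_mid_bounds (lo := lo) (hi := hi) (by omega)
    omega
  · have := PySem.Int.floordiv_two_mid_bounds (lo := lo) (hi := hi) (by omega)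
    omega

def micsandjury_alt (N : Int) (M : Int) (teams : List Int) : Int :=
  (altGo N teams 1 (((PySem.List.max? teams (fun y => y)).getD 0))).getD 1

-- ===== PRECONDITION & SPEC =====
-- Pre_ excludes only the empty list, on which A's max(teams) raises ValueError (B raises there too).
def Pre_micsandjury (N : Int) (M : Int) (teams : List Int) : Prop := teams ≠ []
instance (N : Int) (M : Int) (teams : List Int) : Decidable (Pre_micsandjury N M teams) := by unfold Pre_micsandjury; infer_instance
def pvWitness_micsandjury : Int × Int × List Int := (5, 0, [3, 1])

def Spec_micsandjury (N : Int) (M : Int) (teams : List Int) (out : Int) : Prop := out = micsandjury_alt N M teams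
instance (N : Int) (M : Int) (teams : List Int) (out : Int) : Decidable (Spec_micsandjury N M teams out) := by unfold Spec_micsandjury; infer_instance

-- ===== CLAIM (what is proved, stated in full; the proofs are below) =====
def Claim_equal_micsandjury : Prop := ∀ (N : Int) (M : Int) (teams : List Int), Dom_micsandjury N M teams → Pre_micsandjury N M teams → Spec_micsandjury N M teams (micsandjury N M teams)

-- ===== LEMMAS AND PROOFS =====

-- A's accumulator loop for c computes B's mapped sum.
lemma count_eq (teams : List Int) (m : Int) :
    teams.foldl (fun c i => c + -(PySem.Int.floordiv (-i) m)) 0 = altCount teams m := by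
  unfold altCount
  induction teams with
  | nil => simp
  | cons x t ih =>
    simp only [List.foldl_cons, List.map_cons, List.sum_cons]
    rw [← ih]
    have : ∀ (a : Int) (l : List Int),
        l.foldl (fun c i => c + -(PySem.Int.floordiv (-i) m)) a
          = a + l.foldl (fun c i => c + -(PySem.Int.floordiv (-i) m)) 0 := by
      intro a l
      induction l generalizing a with
      | nil => simp
      | cons y s ihs =>
        simp only [List.foldl_cons]
        rw [ihs, ihs (0 + _)]
        ring
    rw [this]; ring

-- A's midpoint low + (high-low)//2 is B's (low+high)//2.
lemma mid_eq (low high : Int) :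
    low + PySem.Int.floordiv (high - low) 2 = PySem.Int.floordiv (low + high) 2 := by
  rw [PySem.Int.floordiv_eq_ediv_of_pos (b := 2) (by norm_num),
      PySem.Int.floordiv_eq_ediv_of_pos (b := 2) (by norm_num)]
  omega

-- The imperative while-loop equals the recursive descent with default `result`.
lemma loop_eq_go (N : Int) (teams : List Int) (low high result : Int) :
    micsandjuryLoop N teams low high result = (altGo N teams low high).getD result := by
  unfold micsandjuryLoop altGo
  by_cases h : low ≤ high
  · simp only [h, dif_pos]
    rw [count_eq, mid_eq]
    by_cases hc : altCount teams (PySem.Int.floordiv (low + high) 2) ≤ N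
    · simp only [hc, if_pos]
      rw [loop_eq_go N teams low (PySem.Int.floordiv (low + high) 2 - 1)
            (PySem.Int.floordiv (low + high) 2)]
      cases altGo N teams low (PySem.Int.floordiv (low + high) 2 - 1) <;> simp
    · simp only [hc, if_neg, not_false_iff]
      exact loop_eq_go N teams (PySem.Int.floordiv (low + high) 2 + 1) high result
  · simp [h]
termination_by (high + 1 - low).toNat
decreasing_by
  · have := PySem.Int.floordiv_two_mid_bounds (lo := low) (hi := high) (by omega)
    omega
  · have := PySem.Int.floordiv_two_mid_bounds (lo := low) (hi := high) (by omega)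
    omega

-- ===== VERDICT (by name: the statement is the Claim_ definition above) =====
theorem micsandjury_spec : Claim_equal_micsandjury := by
  intro N M teams _hDom _hPre
  unfold Spec_micsandjury micsandjury micsandjury_alt
  exact loop_eq_go N teams 1 _ 1
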